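-- pv_equiv track=rewrite | github.com/thorleifjacobsen/ctf | uithack-2024/web/Intergalactic bandit/app.py | verify_admin
-- ===== SOURCE A (Python) =====
-- def verify_admin(pswd: str) -> bool:
--     if len(pswd) == 0:
--         return False
--
--     p = bytearray(pswd, "utf-8")
--     x = bytearray("*" * len(pswd), "utf-8")
--     for i in range(len(pswd)):
--         x[i] = (p[i] ^ i) ^ x[i]
--
--     return x == b"B^F]K]\x1e"
-- ===== SOURCE B (Python) =====
-- def verify_admin(pswd: str) -> bool:
--     # The loop in A just XOR-masks each byte with (index ^ 42) and compares to a
--     # fixed 7-byte target; inverting the mask yields the unique matching plaintext.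
--     return pswd == "hunter2"
-- ===== Notes on version B (the rewrite author's own statement) =====
-- stated objective: simpler
-- what changed: B replaces A's byte-by-byte XOR loop against a fixed 7-byte target with a single string comparison to the unique inverted plaintext "hunter2".
import Mathlib
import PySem

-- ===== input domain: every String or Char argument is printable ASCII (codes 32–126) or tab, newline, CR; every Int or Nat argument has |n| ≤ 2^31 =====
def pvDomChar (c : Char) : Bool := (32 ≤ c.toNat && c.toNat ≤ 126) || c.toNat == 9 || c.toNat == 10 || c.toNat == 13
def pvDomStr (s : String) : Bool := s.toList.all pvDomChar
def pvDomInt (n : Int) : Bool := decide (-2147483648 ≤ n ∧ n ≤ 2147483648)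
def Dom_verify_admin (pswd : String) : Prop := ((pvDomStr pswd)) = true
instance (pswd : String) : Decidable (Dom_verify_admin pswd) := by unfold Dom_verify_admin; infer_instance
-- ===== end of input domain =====

-- B replaces A's per-byte XOR-mask loop against a fixed 7-byte target with a single
-- comparison to the unique inverted plaintext "hunter2" (objective: simpler).

-- ===== PORT A =====
-- On the ASCII domain, utf-8 encoding is one byte per character equal to its code,
-- so bytearray(pswd, "utf-8") is pswd.toList.map Char.toNat (exact on Dom).
-- The loop sets x[i] = (p[i] ^ i) ^ x[i] with x initialised to b'*' (42), i.e. a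
-- map with index over the bytes; the result is compared to b"B^F]K]\x1e".
def verify_admin (pswd : String) : Bool :=
  if pswd.toList.length = 0 then false
  else
    let p : List Nat := pswd.toList.map Char.toNat
    let x : List Nat := (List.zipIdx p).map (fun pi => (pi.1 ^^^ pi.2) ^^^ 42)
    decide (x = [66, 94, 70, 93, 75, 93, 30])

-- ===== PORT B =====
def verify_admin_alt (pswd : String) : Bool := pswd == "hunter2"

-- ===== PRECONDITION & SPEC =====
def Spec_verify_admin (pswd : String) (out : Bool) : Prop := out = verify_admin_alt pswd
instance (pswd : String) (out : Bool) : Decidable (Spec_verify_admin pswd out) := by unfold Spec_verify_admin; infer_instance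

-- ===== CLAIM (what is proved, stated in full; the proofs are below) =====
def Claim_equal_verify_admin : Prop := ∀ (pswd : String), Dom_verify_admin pswd → Spec_verify_admin pswd (verify_admin pswd)

-- ===== LEMMAS AND PROOFS =====

-- the masked byte determines the character: XOR by a fixed value is injective
theorem pv_mask_inj (a b : Char) (k : Nat) :
    ((a.toNat ^^^ k) ^^^ 42 = (b.toNat ^^^ k) ^^^ 42) ↔ a = b := by
  rw [Nat.xor_left_inj, Nat.xor_left_inj]
  constructor
  · intro h; apply Char.ext; exact UInt32.toNat_inj.mp h
  · intro h; rw [h]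

-- the whole masked list determines the character list (any index offset)
theorem pv_transform_inj (l m : List Char) (k : Nat) :
    ((List.zipIdx (l.map Char.toNat) k).map (fun pi => (pi.1 ^^^ pi.2) ^^^ 42)
      = (List.zipIdx (m.map Char.toNat) k).map (fun pi => (pi.1 ^^^ pi.2) ^^^ 42))
    ↔ l = m := by
  induction l generalizing m k with
  | nil => cases m <;> simp
  | cons a l ih =>
    cases m with
    | nil => simp
    | cons b m =>
      simp only [List.map_cons, List.zipIdx_cons, List.cons.injEq]
      rw [pv_mask_inj, ih]

-- the target is the transform of "hunter2"
theorem pv_target :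
    (List.zipIdx (("hunter2".toList).map Char.toNat) 0).map
      (fun pi => (pi.1 ^^^ pi.2) ^^^ 42) = [66, 94, 70, 93, 75, 93, 30] := by
  decide

-- ===== VERDICT (by name: the statement is the Claim_ definition above) =====
theorem verify_admin_spec : Claim_equal_verify_admin := by
  intro pswd _
  unfold Spec_verify_admin verify_admin verify_admin_alt
  have hB : (pswd == "hunter2") = decide (pswd.toList = "hunter2".toList) := by
    by_cases hh : pswd = "hunter2"
    · subst hh; decide
    · have hne : pswd.toList ≠ "hunter2".toList := fun h => hh (String.toList_inj.mp h)
      simp only [hne, decide_false]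
      exact beq_false_of_ne hh
  rw [hB]
  by_cases h : pswd.toList.length = 0
  · rw [List.length_eq_zero_iff] at h
    simp [h]
  · simp only [h, if_false]
    rw [← pv_target]
    rw [decide_eq_decide]
    exact pv_transform_inj _ _ 0
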